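-- pv_equiv track=rewrite | github.com/thetunr/Scatella | phylogeny.py | assemble_rooted_tree
-- ===== SOURCE A (Python) =====
-- def assemble_rooted_tree(fake_root, E):
--     tree_map = {}
--     def find_children(parent, E):
--         for l, r in E:
--             if l == parent or r == parent:
--                 if l == parent:
--                     if l in tree_map:
--                         tree_map[l].append(r)
--                     else:
--                         tree_map[l] = [r]
--                     find_children(r, list(filter(lambda x: x != (l, r), E)))
--                 else:
--                     if r in tree_map:
--                         tree_map[r].append(l)
--                     else:
--                         tree_map[r] = [l]
--                     find_children(l, list(filter(lambda x: x != (l, r), E)))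
--     find_children(fake_root, E)
--     return tree_map
-- ===== SOURCE B (Python) =====
-- def assemble_rooted_tree(fake_root, E):
--     # Precompute adjacency once (node -> incident edge occurrences in E order),
--     # then DFS with a path-set of used edge tuples instead of rebuilding
--     # filtered edge lists at every step.
--     adj = {}
--     for e in E:
--         l, r = e
--         adj.setdefault(l, []).append((e, r))
--         if r != l:
--             adj.setdefault(r, []).append((e, l))
--     tree_map = {}
--     removed = set()
--
--     def dfs(parent):
--         for e, child in adj.get(parent, []):
--             if e in removed:
--                 continue
--             tree_map.setdefault(parent, []).append(child)
--             removed.add(e)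
--             dfs(child)
--             removed.discard(e)
--
--     dfs(fake_root)
--     return tree_map
-- ===== Notes on version B (the rewrite author's own statement) =====
-- stated objective: alternative
-- what changed: A rescans and rebuilds a filtered copy of the whole edge list at every recursive step; B builds an adjacency dict (node -> incident edge entries) once and runs the same edge-trail DFS over adjacency lists with a backtracking path-set of used edge tuples instead of list copies.
import Mathlib
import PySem

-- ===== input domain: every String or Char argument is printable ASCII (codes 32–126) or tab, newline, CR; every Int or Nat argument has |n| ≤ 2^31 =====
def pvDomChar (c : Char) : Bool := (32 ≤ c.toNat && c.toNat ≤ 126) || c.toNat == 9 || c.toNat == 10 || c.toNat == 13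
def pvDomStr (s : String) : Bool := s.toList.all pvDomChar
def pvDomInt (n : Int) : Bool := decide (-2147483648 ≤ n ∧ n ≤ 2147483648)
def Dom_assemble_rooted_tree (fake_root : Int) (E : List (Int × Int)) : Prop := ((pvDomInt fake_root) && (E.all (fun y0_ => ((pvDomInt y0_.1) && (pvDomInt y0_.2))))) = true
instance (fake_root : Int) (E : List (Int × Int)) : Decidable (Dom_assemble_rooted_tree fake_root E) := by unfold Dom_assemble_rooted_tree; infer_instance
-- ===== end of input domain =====

-- B replaces A's filter-and-recurse DFS (a fresh O(E) filtered edge list per step) by a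
-- once-built adjacency dict and a DFS with a backtracking path-set of used edge tuples.

-- termination helper (cited by the ports' decreasing_by): a filter that drops a present element is shorter
theorem pv_filter_lt {α : Type} (q : α → Bool) (L : List α) (e : α)
    (he : e ∈ L) (hqe : q e = false) : (L.filter q).length < L.length := by
  induction L with
  | nil => cases he
  | cons a t ih =>
    by_cases ha : q a = true
    · rw [List.filter_cons_of_pos ha]
      have het : e ∈ t := by
        rcases List.mem_cons.1 he with h | h
        · subst h; rw [ha] at hqe; cases hqe
        · exact h
      exact Nat.succ_lt_succ (ih het)
    · rw [List.filter_cons_of_neg (by simpa using ha)]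
      have := List.length_filter_le q t
      simp only [List.length_cons]
      omega

-- termination helper: filtering by a strictly stronger predicate (witnessed at a member e) is strictly shorter
theorem pv_filter_le2 {α : Type} (p q : α → Bool) (himp : ∀ x, q x = true → p x = true) :
    ∀ L : List α, (L.filter q).length ≤ (L.filter p).length := by
  intro L
  induction L with
  | nil => simp
  | cons a t ih =>
    by_cases hq : q a = true
    · rw [List.filter_cons_of_pos hq, List.filter_cons_of_pos (himp a hq)]
      exact Nat.succ_le_succ ih
    · rw [List.filter_cons_of_neg (by simpa using hq)]
      by_cases hp : p a = true
      · rw [List.filter_cons_of_pos hp]; exact Nat.le_succ_of_le ih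
      · rw [List.filter_cons_of_neg (by simpa using hp)]; exact ih

theorem pv_filter_lt2 {α : Type} (p q : α → Bool) (L : List α) (e : α) (he : e ∈ L)
    (hpe : p e = true) (hqe : q e = false) (himp : ∀ x, q x = true → p x = true) :
    (L.filter q).length < (L.filter p).length := by
  induction L with
  | nil => cases he
  | cons a t ih =>
    by_cases hq : q a = true
    · rw [List.filter_cons_of_pos hq, List.filter_cons_of_pos (himp a hq)]
      refine Nat.succ_lt_succ (ih ?_)
      rcases List.mem_cons.1 he with rfl | h
      · rw [hq] at hqe; cases hqe
      · exact h
    · rw [List.filter_cons_of_neg (by simpa using hq)]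
      by_cases hp : p a = true
      · rw [List.filter_cons_of_pos hp]
        exact Nat.lt_succ_of_le (pv_filter_le2 p q himp t)
      · rw [List.filter_cons_of_neg (by simpa using hp)]
        refine ih ?_
        rcases List.mem_cons.1 he with rfl | h
        · rw [hpe] at hp; cases hp rfl
        · exact h

-- ===== PORT A =====
def pvUpd (tm : PySem.Dict Int (List Int)) (p c : Int) : PySem.Dict Int (List Int) :=
  match tm.get? p with
  | some xs => tm.insert p (xs ++ [c])
  | none    => tm.insert p [c]

-- find_children: 'es' is the part of the level's list E still to be scanned (A's for-loop);
-- the proof argument (es ⊆ E) only justifies termination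
def pvFindA (parent : Int) (E : List (Int × Int)) (es : List (Int × Int))
    (h : ∀ e ∈ es, e ∈ E) (tm : PySem.Dict Int (List Int)) : PySem.Dict Int (List Int) :=
  match es with
  | [] => tm
  | (l, r) :: rest =>
    if l = parent ∨ r = parent then
      if l = parent then
        let tm1 := pvUpd tm l r
        let E' := E.filter (fun x => decide (x ≠ (l, r)))
        let tm2 := pvFindA r E' E' (fun _ hx => hx) tm1
        pvFindA parent E rest (fun e he => h e (List.mem_cons_of_mem _ he)) tm2
      else
        let tm1 := pvUpd tm r l
        let E' := E.filter (fun x => decide (x ≠ (l, r)))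
        let tm2 := pvFindA l E' E' (fun _ hx => hx) tm1
        pvFindA parent E rest (fun e he => h e (List.mem_cons_of_mem _ he)) tm2
    else
      pvFindA parent E rest (fun e he => h e (List.mem_cons_of_mem _ he)) tm
termination_by (E.length, es.length)
decreasing_by
  all_goals first
    | exact Prod.Lex.right _ (Nat.lt_succ_self _)
    | · refine Prod.Lex.left _ _ ?_
        simp only [List.length_unattach]
        rw [← List.length_attach (l := E)]
        exact pv_filter_lt _ _ ⟨(l, r), h (l, r) List.mem_cons_self⟩ (List.mem_attach _ _)
          (by simp)

def assemble_rooted_tree (fake_root : Int) (E : List (Int × Int)) : List (Int × List Int) :=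
  (pvFindA fake_root E E (fun _ hx => hx) PySem.Dict.empty).items

-- ===== PORT B =====
-- adjacency: node -> list of (edge tuple, other endpoint), in E order (setdefault+append)
def pvAdjStep (d : PySem.Dict Int (List ((Int × Int) × Int))) (e : Int × Int) :
    PySem.Dict Int (List ((Int × Int) × Int)) :=
  let d1 := d.modify e.1 [] (· ++ [(e, e.2)])
  if e.2 ≠ e.1 then d1.modify e.2 [] (· ++ [(e, e.1)]) else d1

def pvAdj (E : List (Int × Int)) : PySem.Dict Int (List ((Int × Int) × Int)) :=
  E.foldl pvAdjStep PySem.Dict.empty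

-- the entries of E incident to k, in order, with the child endpoint (l-side first on a self-loop)
def pvProj (k : Int) (E : List (Int × Int)) : List ((Int × Int) × Int) :=
  (E.filter (fun e => decide (e.1 = k ∨ e.2 = k))).map (fun e => (e, if e.1 = k then e.2 else e.1))

theorem pvAdjStep_getD (d : PySem.Dict Int (List ((Int × Int) × Int))) (e : Int × Int) (k : Int) :
    (pvAdjStep d e).getD k [] = d.getD k [] ++ pvProj k [e] := by
  unfold pvAdjStep pvProj
  by_cases h1 : e.1 = k <;> by_cases h2 : e.2 = k <;> by_cases h3 : e.2 = e.1 <;>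
    simp [PySem.Dict.getD_modify, h1, h2, h3] <;>
      (try simp_all [PySem.Dict.getD_modify]) <;> (try omega) <;> (try rw [if_neg (by omega), if_neg (by omega)])

theorem pvProj_cons (k : Int) (e : Int × Int) (t : List (Int × Int)) :
    pvProj k (e :: t) = pvProj k [e] ++ pvProj k t := by
  unfold pvProj
  by_cases h : (e.1 = k ∨ e.2 = k) <;> simp [List.filter_cons, h]

theorem pvAdj_getD (E : List (Int × Int)) (k : Int) :
    (pvAdj E).getD k [] = pvProj k E := by
  suffices H : ∀ (L : List (Int × Int)) (d : PySem.Dict Int (List ((Int × Int) × Int))),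
      (L.foldl pvAdjStep d).getD k [] = d.getD k [] ++ pvProj k L by
    have := H E PySem.Dict.empty
    simpa [pvAdj] using this
  intro L
  induction L with
  | nil => intro d; simp [pvProj]
  | cons e t ih =>
    intro d
    rw [List.foldl_cons, ih, pvAdjStep_getD, pvProj_cons k e t, List.append_assoc]

theorem pvAdj_mem (E : List (Int × Int)) :
    ∀ k p, p ∈ (pvAdj E).getD k [] → p.1 ∈ E := by
  intro k p hp
  rw [pvAdj_getD] at hp
  unfold pvProj at hp
  rcases List.mem_map.1 hp with ⟨e, he, rfl⟩
  exact List.mem_of_mem_filter he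

-- DFS over the adjacency lists; 'removed' is the set of edge tuples used on the current path,
-- restored on backtrack simply by passing the old set to the sibling scan.
-- The two proof arguments (every adjacency entry's edge tuple occurs in E) only justify termination.
def pvDfsB (adj : PySem.Dict Int (List ((Int × Int) × Int))) (E : List (Int × Int))
    (hadj : ∀ k p, p ∈ adj.getD k [] → p.1 ∈ E)
    (parent : Int) (entries : List ((Int × Int) × Int)) (hent : ∀ p ∈ entries, p.1 ∈ E)
    (removed : PySem.Set (Int × Int)) (tm : PySem.Dict Int (List Int)) :
    PySem.Dict Int (List Int) :=
  match entries with
  | [] => tm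
  | (e, child) :: rest =>
    if e ∈ removed then
      pvDfsB adj E hadj parent rest (fun p hp => hent p (List.mem_cons_of_mem _ hp)) removed tm
    else
      let tm1 := tm.modify parent [] (· ++ [child])
      let tm2 := pvDfsB adj E hadj child (adj.getD child []) (fun p hp => hadj child p hp)
                   (PySem.Set.add removed e) tm1
      pvDfsB adj E hadj parent rest (fun p hp => hent p (List.mem_cons_of_mem _ hp)) removed tm2
termination_by ((E.filter (fun x => decide (x ∉ removed))).length, entries.length)
decreasing_by
  all_goals first
    | exact Prod.Lex.right _ (Nat.lt_succ_self _)
    | · rename_i hnotmem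
        refine Prod.Lex.left _ _ ?_
        refine pv_filter_lt2 _ _ E e (hent (e, child) List.mem_cons_self) ?_ ?_ ?_
        · simpa using hnotmem
        · simp [PySem.Set.mem_add]
        · intro x hx
          simp only [decide_eq_true_eq] at hx ⊢
          exact fun hmem => hx (by simp [PySem.Set.mem_add, hmem])

def assemble_rooted_tree_alt (fake_root : Int) (E : List (Int × Int)) : List (Int × List Int) :=
  (pvDfsB (pvAdj E) E (pvAdj_mem E) fake_root ((pvAdj E).getD fake_root [])
    (fun p hp => pvAdj_mem E fake_root p hp) PySem.Set.empty PySem.Dict.empty).items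

-- ===== PRECONDITION & SPEC =====
def Spec_assemble_rooted_tree (fake_root : Int) (E : List (Int × Int)) (out : List (Int × List Int)) : Prop := out = assemble_rooted_tree_alt fake_root E
instance (fake_root : Int) (E : List (Int × Int)) (out : List (Int × List Int)) : Decidable (Spec_assemble_rooted_tree fake_root E out) := by unfold Spec_assemble_rooted_tree; infer_instance

-- ===== CLAIM (what is proved, stated in full; the proofs are below) =====
def Claim_equal_assemble_rooted_tree : Prop := ∀ (fake_root : Int) (E : List (Int × Int)), Dom_assemble_rooted_tree fake_root E → Spec_assemble_rooted_tree fake_root E (assemble_rooted_tree fake_root E)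

-- ===== LEMMAS AND PROOFS =====

-- pvUpd (A's if-in-else update) is the same dict update as B's setdefault+append (modify)
theorem pvUpd_modify (tm : PySem.Dict Int (List Int)) (p c : Int) :
    pvUpd tm p c = tm.modify p [] (· ++ [c]) := by
  unfold pvUpd
  cases h : tm.get? p <;>
    simp [PySem.Dict.modify, PySem.Dict.getD_eq_get?_getD, h]

-- reference loop: scan the ORIGINAL edge list, skipping edges in the path set R;
-- both ports are proved equal to it
def pvRef (E0 : List (Int × Int)) (parent : Int) (R : PySem.Set (Int × Int))
    (es : List (Int × Int)) (h : ∀ e ∈ es, e ∈ E0) (tm : PySem.Dict Int (List Int)) :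
    PySem.Dict Int (List Int) :=
  match es with
  | [] => tm
  | (l, r) :: rest =>
    if (l, r) ∈ R then
      pvRef E0 parent R rest (fun e he => h e (List.mem_cons_of_mem _ he)) tm
    else if l = parent ∨ r = parent then
      let child := if l = parent then r else l
      let tm2 := pvRef E0 child (PySem.Set.add R (l, r)) E0 (fun _ hx => hx)
                   (pvUpd tm parent child)
      pvRef E0 parent R rest (fun e he => h e (List.mem_cons_of_mem _ he)) tm2
    else
      pvRef E0 parent R rest (fun e he => h e (List.mem_cons_of_mem _ he)) tm
termination_by ((E0.filter (fun x => decide (x ∉ R))).length, es.length)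
decreasing_by
  all_goals first
    | exact Prod.Lex.right _ (Nat.lt_succ_self _)
    | · rename_i hnm hor
        refine Prod.Lex.left _ _ ?_
        refine pv_filter_lt2 _ _ E0 (l, r) (h (l, r) List.mem_cons_self) ?_ ?_ ?_
        · simpa using hnm
        · simp [PySem.Set.mem_add]
        · intro x hx
          simp only [decide_eq_true_eq] at hx ⊢
          exact fun hmem => hx (by simp [PySem.Set.mem_add, hmem])

-- one-step unfolding lemmas
theorem pvRef_nil (E0 : List (Int × Int)) (parent : Int) (R : PySem.Set (Int × Int))
    (h : ∀ e ∈ ([] : List (Int × Int)), e ∈ E0) (tm : PySem.Dict Int (List Int)) :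
    pvRef E0 parent R [] h tm = tm := by
  rw [pvRef]

theorem pvRef_cons (E0 : List (Int × Int)) (parent : Int) (R : PySem.Set (Int × Int))
    (l r : Int) (rest : List (Int × Int)) (h : ∀ e ∈ (l, r) :: rest, e ∈ E0)
    (tm : PySem.Dict Int (List Int)) :
    pvRef E0 parent R ((l, r) :: rest) h tm =
      if (l, r) ∈ R then
        pvRef E0 parent R rest (fun e he => h e (List.mem_cons_of_mem _ he)) tm
      else if l = parent ∨ r = parent then
        pvRef E0 parent R rest (fun e he => h e (List.mem_cons_of_mem _ he))
          (pvRef E0 (if l = parent then r else l) (PySem.Set.add R (l, r)) E0 (fun _ hx => hx)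
            (pvUpd tm parent (if l = parent then r else l)))
      else
        pvRef E0 parent R rest (fun e he => h e (List.mem_cons_of_mem _ he)) tm := by
  rw [pvRef]

theorem pvFindA_nil (parent : Int) (E : List (Int × Int))
    (h : ∀ e ∈ ([] : List (Int × Int)), e ∈ E) (tm : PySem.Dict Int (List Int)) :
    pvFindA parent E [] h tm = tm := by
  rw [pvFindA]

theorem pvFindA_cons (parent : Int) (E : List (Int × Int)) (l r : Int)
    (rest : List (Int × Int)) (h : ∀ e ∈ (l, r) :: rest, e ∈ E)
    (tm : PySem.Dict Int (List Int)) :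
    pvFindA parent E ((l, r) :: rest) h tm =
      if l = parent ∨ r = parent then
        if l = parent then
          pvFindA parent E rest (fun e he => h e (List.mem_cons_of_mem _ he))
            (pvFindA r (E.filter (fun x => decide (x ≠ (l, r))))
              (E.filter (fun x => decide (x ≠ (l, r)))) (fun _ hx => hx) (pvUpd tm l r))
        else
          pvFindA parent E rest (fun e he => h e (List.mem_cons_of_mem _ he))
            (pvFindA l (E.filter (fun x => decide (x ≠ (l, r))))
              (E.filter (fun x => decide (x ≠ (l, r)))) (fun _ hx => hx) (pvUpd tm r l))
      else
        pvFindA parent E rest (fun e he => h e (List.mem_cons_of_mem _ he)) tm := by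
  rw [pvFindA]

theorem pvDfsB_cons (adj : PySem.Dict Int (List ((Int × Int) × Int))) (E : List (Int × Int))
    (hadj : ∀ k p, p ∈ adj.getD k [] → p.1 ∈ E) (parent : Int)
    (e : Int × Int) (child : Int) (rest : List ((Int × Int) × Int))
    (hent : ∀ p ∈ (e, child) :: rest, p.1 ∈ E)
    (removed : PySem.Set (Int × Int)) (tm : PySem.Dict Int (List Int)) :
    pvDfsB adj E hadj parent ((e, child) :: rest) hent removed tm =
      if e ∈ removed then
        pvDfsB adj E hadj parent rest (fun p hp => hent p (List.mem_cons_of_mem _ hp)) removed tm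
      else
        pvDfsB adj E hadj parent rest (fun p hp => hent p (List.mem_cons_of_mem _ hp)) removed
          (pvDfsB adj E hadj child (adj.getD child []) (fun p hp => hadj child p hp)
            (PySem.Set.add removed e) (tm.modify parent [] (· ++ [child]))) := by
  rw [pvDfsB]

-- equality of an es-argument transports across the (termination-only) proof argument
theorem pvFindA_congr_es (parent : Int) (E : List (Int × Int)) (esf esf' : List (Int × Int))
    (heq : esf = esf') (hA : ∀ e ∈ esf, e ∈ E) (hA' : ∀ e ∈ esf', e ∈ E)
    (tm : PySem.Dict Int (List Int)) :
    pvFindA parent E esf hA tm = pvFindA parent E esf' hA' tm := by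
  subst heq; rfl

theorem pvDfsB_congr_ents (adj : PySem.Dict Int (List ((Int × Int) × Int)))
    (E : List (Int × Int)) (hadj : ∀ k p, p ∈ adj.getD k [] → p.1 ∈ E) (parent : Int)
    (ents ents' : List ((Int × Int) × Int)) (heq : ents = ents')
    (hB : ∀ p ∈ ents, p.1 ∈ E) (hB' : ∀ p ∈ ents', p.1 ∈ E)
    (removed : PySem.Set (Int × Int)) (tm : PySem.Dict Int (List Int)) :
    pvDfsB adj E hadj parent ents hB removed tm = pvDfsB adj E hadj parent ents' hB' removed tm := by
  subst heq; rfl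

-- filtering a level list once more by ≠ e is filtering the original list by the grown path set
theorem pv_filter_add (E0 : List (Int × Int)) (R : PySem.Set (Int × Int)) (e : Int × Int) :
    (E0.filter (fun x => decide (x ∉ R))).filter (fun x => decide (x ≠ e)) =
      E0.filter (fun x => decide (x ∉ PySem.Set.add R e)) := by
  rw [List.filter_filter]
  apply List.filter_congr
  intro x _
  by_cases h1 : x ∈ R <;> by_cases h2 : x = e <;> simp [PySem.Set.mem_add, h1, h2]

theorem pv_filter_add_len (E0 : List (Int × Int)) (R : PySem.Set (Int × Int)) (e : Int × Int)
    (he : e ∈ E0) (hnm : e ∉ R) :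
    (E0.filter (fun x => decide (x ∉ PySem.Set.add R e))).length <
      (E0.filter (fun x => decide (x ∉ R))).length := by
  refine pv_filter_lt2 _ _ E0 e he (by simpa using hnm) (by simp [PySem.Set.mem_add]) ?_
  intro x hx
  simp only [decide_eq_true_eq] at hx ⊢
  exact fun hmem => hx (by simp [PySem.Set.mem_add, hmem])

-- A's filter-and-recurse scan equals the reference loop
theorem pvLA (E0 : List (Int × Int)) :
    ∀ (n : Nat) (R : PySem.Set (Int × Int)),
      (E0.filter (fun x => decide (x ∉ R))).length = n →
      ∀ (es : List (Int × Int)) (hs : ∀ e ∈ es, e ∈ E0)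
        (parent : Int) (tm : PySem.Dict Int (List Int))
        (F esf : List (Int × Int)) (hF : F = E0.filter (fun x => decide (x ∉ R)))
        (hesf : esf = es.filter (fun x => decide (x ∉ R)))
        (hA : ∀ e ∈ esf, e ∈ F),
      pvFindA parent F esf hA tm = pvRef E0 parent R es hs tm := by
  intro n
  induction n using Nat.strong_induction_on with
  | _ n IH =>
    intro R hn es
    induction es with
    | nil =>
      intro hs parent tm F esf hF hesf hA
      rw [pvFindA_congr_es parent F esf [] (by simp [hesf]) hA (by simp), pvFindA_nil,
        pvRef_nil]
    | cons hd rest ihes =>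
      obtain ⟨l, r⟩ := hd
      intro hs parent tm F esf hF hesf hA
      rw [pvRef_cons]
      by_cases hmem : (l, r) ∈ R
      · rw [if_pos hmem]
        have hesf' : esf = rest.filter (fun x => decide (x ∉ R)) := by
          rw [hesf, List.filter_cons_of_neg (by simpa using hmem)]
        exact ihes (fun e he => hs e (List.mem_cons_of_mem _ he)) parent tm F esf hF hesf' hA
      · rw [if_neg hmem]
        have hkeep : esf = (l, r) :: rest.filter (fun x => decide (x ∉ R)) := by
          rw [hesf, List.filter_cons_of_pos (by simpa using hmem)]
        have hA' : ∀ e ∈ (l, r) :: rest.filter (fun x => decide (x ∉ R)), e ∈ F := by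
          intro e he; exact hA e (by rw [hkeep]; exact he)
        rw [pvFindA_congr_es parent F esf _ hkeep hA hA', pvFindA_cons]
        have hmemE : (l, r) ∈ E0 := hs (l, r) List.mem_cons_self
        have hlen : (E0.filter (fun x => decide (x ∉ PySem.Set.add R (l, r)))).length < n :=
          hn ▸ pv_filter_add_len E0 R (l, r) hmemE hmem
        have hFF : F.filter (fun x => decide (x ≠ (l, r))) =
            E0.filter (fun x => decide (x ∉ PySem.Set.add R (l, r))) := by
          rw [hF, pv_filter_add]
        by_cases hinc : l = parent ∨ r = parent
        · rw [if_pos hinc, if_pos hinc]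
          rcases Decidable.em (l = parent) with hl | hl
          · rw [if_pos hl]
            have hch : (if l = parent then r else l) = r := if_pos hl
            rw [hch]
            have hup : pvUpd tm parent r = pvUpd tm l r := by rw [hl]
            rw [hup]
            have hrec := IH _ hlen (PySem.Set.add R (l, r)) rfl E0 (fun _ hx => hx) r
              (pvUpd tm l r) (F.filter (fun x => decide (x ≠ (l, r))))
              (F.filter (fun x => decide (x ≠ (l, r)))) hFF
              (by rw [hF, pv_filter_add]) (fun _ hx => hx)
            rw [hrec]
            exact ihes (fun e he => hs e (List.mem_cons_of_mem _ he)) parent _ F _ hF rfl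
              (fun e he => hA' e (List.mem_cons_of_mem _ he))
          · rw [if_neg hl]
            have hr : r = parent := hinc.resolve_left hl
            have hch : (if l = parent then r else l) = l := if_neg hl
            rw [hch]
            have hup : pvUpd tm parent l = pvUpd tm r l := by rw [hr]
            rw [hup]
            have hrec := IH _ hlen (PySem.Set.add R (l, r)) rfl E0 (fun _ hx => hx) l
              (pvUpd tm r l) (F.filter (fun x => decide (x ≠ (l, r))))
              (F.filter (fun x => decide (x ≠ (l, r)))) hFF
              (by rw [hF, pv_filter_add]) (fun _ hx => hx)
            rw [hrec]
            exact ihes (fun e he => hs e (List.mem_cons_of_mem _ he)) parent _ F _ hF rfl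
              (fun e he => hA' e (List.mem_cons_of_mem _ he))
        · rw [if_neg hinc, if_neg hinc]
          rw [pvFindA_congr_es parent F _ (rest.filter (fun x => decide (x ∉ R))) rfl
            (fun e he => hA' e (List.mem_cons_of_mem _ he)) (fun e he => hA' e (List.mem_cons_of_mem _ he))]
          exact ihes (fun e he => hs e (List.mem_cons_of_mem _ he)) parent tm F _ hF rfl _

-- the single entry pvProj produces for one edge
theorem pvProj_single (k : Int) (e : Int × Int) :
    pvProj k [e] = if e.1 = k ∨ e.2 = k then [(e, if e.1 = k then e.2 else e.1)] else [] := by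
  by_cases h : (e.1 = k ∨ e.2 = k) <;> simp [pvProj, h]

-- B's adjacency DFS equals the reference loop
theorem pvLB (E0 : List (Int × Int)) :
    ∀ (n : Nat) (R : PySem.Set (Int × Int)),
      (E0.filter (fun x => decide (x ∉ R))).length = n →
      ∀ (es : List (Int × Int)) (hs : ∀ e ∈ es, e ∈ E0)
        (parent : Int) (tm : PySem.Dict Int (List Int))
        (ents : List ((Int × Int) × Int)) (hents : ents = pvProj parent es)
        (hB : ∀ p ∈ ents, p.1 ∈ E0),
      pvDfsB (pvAdj E0) E0 (pvAdj_mem E0) parent ents hB R tm = pvRef E0 parent R es hs tm := by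
  intro n
  induction n using Nat.strong_induction_on with
  | _ n IH =>
    intro R hn es
    induction es with
    | nil =>
      intro hs parent tm ents hents hB
      rw [pvDfsB_congr_ents _ _ _ parent ents [] (by simp [hents, pvProj]) hB (by simp),
        pvRef_nil]
      rw [pvDfsB]
    | cons hd rest ihes =>
      obtain ⟨l, r⟩ := hd
      intro hs parent tm ents hents hB
      rw [pvRef_cons]
      have hmemE : (l, r) ∈ E0 := hs (l, r) List.mem_cons_self
      by_cases hinc : l = parent ∨ r = parent
      · -- ents starts with this edge's entry
        have hkeep : ents = ((l, r), if l = parent then r else l) :: pvProj parent rest := by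
          rw [hents, pvProj_cons, pvProj_single]
          simp only [if_pos hinc]
          rfl
        have hB' : ∀ p ∈ ((l, r), if l = parent then r else l) :: pvProj parent rest, p.1 ∈ E0 := by
          intro p hp; exact hB p (by rw [hkeep]; exact hp)
        rw [pvDfsB_congr_ents _ _ _ parent ents _ hkeep hB hB', pvDfsB_cons]
        by_cases hmem : (l, r) ∈ R
        · rw [if_pos hmem, if_pos hmem]
          exact ihes (fun e he => hs e (List.mem_cons_of_mem _ he)) parent tm _ rfl _
        · rw [if_neg hmem, if_neg hmem, if_pos hinc]
          have hlen : (E0.filter (fun x => decide (x ∉ PySem.Set.add R (l, r)))).length < n :=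
            hn ▸ pv_filter_add_len E0 R (l, r) hmemE hmem
          have hrec := IH _ hlen (PySem.Set.add R (l, r)) rfl E0 (fun _ hx => hx)
            (if l = parent then r else l)
            ((tm.modify parent [] (· ++ [if l = parent then r else l])))
            ((pvAdj E0).getD (if l = parent then r else l) [])
            (pvAdj_getD E0 (if l = parent then r else l))
            (fun p hp => pvAdj_mem E0 (if l = parent then r else l) p hp)
          rw [hrec, ← pvUpd_modify]
          exact ihes (fun e he => hs e (List.mem_cons_of_mem _ he)) parent _ _ rfl _
      · -- this edge contributes no entry for 'parent'
        have hkeep : ents = pvProj parent rest := by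
          rw [hents, pvProj_cons, pvProj_single]
          simp only [if_neg hinc, List.nil_append]
        by_cases hmem : (l, r) ∈ R
        · rw [if_pos hmem]
          exact ihes (fun e he => hs e (List.mem_cons_of_mem _ he)) parent tm ents hkeep hB
        · rw [if_neg hmem, if_neg hinc]
          exact ihes (fun e he => hs e (List.mem_cons_of_mem _ he)) parent tm ents hkeep hB

-- ===== VERDICT (by name: the statement is the Claim_ definition above) =====
theorem assemble_rooted_tree_spec : Claim_equal_assemble_rooted_tree := by
  unfold Claim_equal_assemble_rooted_tree Spec_assemble_rooted_tree
  intro fake_root E _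
  unfold assemble_rooted_tree assemble_rooted_tree_alt
  congr 1
  have hE : E = E.filter (fun x => decide (x ∉ (PySem.Set.empty : PySem.Set (Int × Int)))) := by
    simp [PySem.Set.empty]
  have hA := pvLA E (E.filter (fun x => decide (x ∉ (PySem.Set.empty : PySem.Set (Int × Int))))).length
    PySem.Set.empty rfl E (fun _ hx => hx) fake_root PySem.Dict.empty E E hE hE (fun _ hx => hx)
  have hB := pvLB E (E.filter (fun x => decide (x ∉ (PySem.Set.empty : PySem.Set (Int × Int))))).length
    PySem.Set.empty rfl E (fun _ hx => hx) fake_root PySem.Dict.empty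
    ((pvAdj E).getD fake_root []) (pvAdj_getD E fake_root)
    (fun p hp => pvAdj_mem E fake_root p hp)
  rw [hA, ← hB]
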